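-- pv_equiv track=rewrite | github.com/petrzamecnik/UTB_AP3KR | playfair/main.py | text_to_bigram
-- ===== SOURCE A (Python) =====
-- def text_to_bigram(input_):
--     input_list = []
--     bigram_list = []
--
--     for x in input_:
--         input_list.append(x)
--
--     for x in range(0, len(input_list), 2):
--         bigram_list.append(input_list[x: x + 2])
--
--     return bigram_list
-- ===== SOURCE B (Python) =====
-- def text_to_bigram(input_):
--     bigram_list = []
--     for i, ch in enumerate(input_):
--         if i % 2 == 0:
--             bigram_list.append([ch])
--         else:
--             bigram_list[-1].append(ch)
--     return bigram_list
-- ===== Notes on version B (the rewrite author's own statement) =====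
-- stated objective: simpler
-- what changed: Replaces the two-pass materialize-then-index-slice loop with a single pass over the input that appends a fresh pair on even positions and completes the last pair on odd positions.
import Mathlib
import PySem

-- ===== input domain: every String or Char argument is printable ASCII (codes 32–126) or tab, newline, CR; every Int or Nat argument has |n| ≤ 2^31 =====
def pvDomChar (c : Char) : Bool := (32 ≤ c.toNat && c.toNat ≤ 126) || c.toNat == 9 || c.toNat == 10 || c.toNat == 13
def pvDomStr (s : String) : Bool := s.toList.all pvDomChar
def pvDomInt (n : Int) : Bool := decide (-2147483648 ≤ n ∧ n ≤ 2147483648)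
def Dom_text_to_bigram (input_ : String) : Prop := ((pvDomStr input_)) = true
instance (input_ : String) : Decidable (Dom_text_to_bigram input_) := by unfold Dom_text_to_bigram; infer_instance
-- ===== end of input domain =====

-- B replaces A's materialize-then-index-slice two-pass structure with a single pass that
-- starts a fresh pair on even positions and completes the open pair on odd ones (objective: simpler).

-- ===== PORT A =====
def text_to_bigram (input_ : String) : List (List String) :=
  -- input_list = []; for x in input_: input_list.append(x)
  let input_list : List String :=
    input_.toList.foldl (fun acc x => acc ++ [String.ofList [x]]) []
  -- for x in range(0, len(input_list), 2): bigram_list.append(input_list[x:x+2])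
  (PySem.List.pyRange 0 (input_list.length : Int) 2).foldl
    (fun acc x => acc ++ [PySem.List.slice input_list (some x) (some (x + 2))]) []

-- ===== PORT B =====
-- i % 2: enumerate indices are ≥ 0, where Int's % agrees with Python's %
def text_to_bigram_alt (input_ : String) : List (List String) :=
  (PySem.List.enumerate (input_.toList.map (fun c => String.ofList [c])) 0).foldl
    (fun acc p =>
      if p.1 % 2 == 0 then acc ++ [[p.2]]
      else acc.dropLast ++ [acc.getLast! ++ [p.2]]) []

-- ===== PRECONDITION & SPEC =====
def Spec_text_to_bigram (input_ : String) (out : List (List String)) : Prop := out = text_to_bigram_alt input_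
instance (input_ : String) (out : List (List String)) : Decidable (Spec_text_to_bigram input_ out) := by unfold Spec_text_to_bigram; infer_instance

-- ===== CLAIM (what is proved, stated in full; the proofs are below) =====
def Claim_equal_text_to_bigram : Prop := ∀ (input_ : String), Dom_text_to_bigram input_ → Spec_text_to_bigram input_ (text_to_bigram input_)

-- ===== LEMMAS AND PROOFS =====

-- reference shape: both programs produce the input grouped into consecutive pairs
def pvPairs : List String → List (List String)
  | [] => []
  | [a] => [[a]]
  | a :: b :: t => [a, b] :: pvPairs t

theorem pyRange_two_nil (a b : Int) (h : b ≤ a) : PySem.List.pyRange a b 2 = [] := by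
  rw [PySem.List.pyRange_of_pos a b (by omega)]
  simp [show ¬ a < b by omega]

theorem pyRange_two_cons (a b : Int) (h : a < b) :
    PySem.List.pyRange a b 2 = a :: PySem.List.pyRange (a + 2) b 2 := by
  rw [PySem.List.pyRange_of_pos a b (by omega), PySem.List.pyRange_of_pos (a + 2) b (by omega)]
  by_cases h2 : a + 2 < b
  · rw [if_pos h, if_pos h2,
      show ((b - a + 2 - 1) / 2).toNat = ((b - (a + 2) + 2 - 1) / 2).toNat + 1 by omega,
      List.range_succ_eq_map]
    simp only [List.map_cons, List.map_map, Nat.cast_zero, mul_zero, add_zero]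
    exact congrArg₂ List.cons rfl (List.map_congr_left fun k _ => by
      simp only [Function.comp_apply]; push_cast; ring)
  · rw [if_pos h, if_neg h2, show ((b - a + 2 - 1) / 2).toNat = 1 by omega]
    simp

theorem sliceA (front l : List String) :
    (PySem.List.pyRange (front.length : Int) ((front.length : Int) + (l.length : Int)) 2).map
      (fun x => PySem.List.slice (front ++ l) (some x) (some (x + 2))) = pvPairs l := by
  induction l using pvPairs.induct generalizing front with
  | case1 =>
    rw [pyRange_two_nil _ _ (by simp)]; rfl
  | case2 a =>
    rw [pyRange_two_cons _ _ (by push_cast [List.length_singleton]; omega), pyRange_two_nil _ _ (by push_cast [List.length_singleton]; omega)]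
    simp only [List.map_cons, List.map_nil]
    have hsl := PySem.List.slice_natCast_add (front ++ [a]) front.length 2
    rw [show ((front.length : Int) + ((2 : Nat) : Int)) = (front.length : Int) + 2 by norm_num] at hsl
    rw [hsl]
    simp [pvPairs]
  | case3 a b t ih =>
    rw [pyRange_two_cons _ _ (by push_cast [List.length_cons]; omega)]
    simp only [List.map_cons]
    have hsl := PySem.List.slice_natCast_add (front ++ a :: b :: t) front.length 2
    rw [show ((front.length : Int) + ((2 : Nat) : Int)) = (front.length : Int) + 2 by norm_num] at hsl
    rw [hsl]
    have h2 := ih (front ++ [a, b])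
    rw [show front ++ [a, b] ++ t = front ++ a :: b :: t by simp,
      show (((front ++ [a, b]).length : Nat) : Int) = (front.length : Int) + 2 by
        push_cast [List.length_append, List.length_cons, List.length_nil]; ring] at h2
    rw [show (front.length : Int) + ((a :: b :: t).length : Int)
        = (front.length : Int) + 2 + ((t.length : Int)) by push_cast [List.length_cons]; ring]
    rw [h2]
    simp [pvPairs]

theorem foldB (l : List String) (acc : List (List String)) (s : Int)
    (hs : s % 2 = 0) :
    (PySem.List.enumerate l s).foldl
      (fun acc p =>
        if p.1 % 2 == 0 then acc ++ [[p.2]]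
        else acc.dropLast ++ [acc.getLast! ++ [p.2]]) acc = acc ++ pvPairs l := by
  induction l using pvPairs.induct generalizing acc s with
  | case1 => rw [PySem.List.enumerate_nil]; simp [pvPairs]
  | case2 a =>
    have h1 : (s % 2 == 0) = true := beq_iff_eq.mpr hs
    rw [PySem.List.enumerate_cons, PySem.List.enumerate_nil]
    simp only [List.foldl_cons, List.foldl_nil, h1, if_true]
    simp [pvPairs]
  | case3 a b t ih =>
    have h1 : (s % 2 == 0) = true := beq_iff_eq.mpr hs
    have h2 : ((s + 1) % 2 == 0) = false := beq_eq_false_iff_ne.mpr (by omega)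
    rw [PySem.List.enumerate_cons, PySem.List.enumerate_cons]
    simp only [List.foldl_cons, h1, h2, if_true, Bool.false_eq_true, if_false]
    rw [List.dropLast_concat, List.getLast!_eq_getLast?_getD, List.getLast?_concat]
    rw [show s + 1 + 1 = s + 2 by ring]
    rw [ih _ (s + 2) (by omega)]
    simp [pvPairs]

-- ===== VERDICT (by name: the statement is the Claim_ definition above) =====
theorem text_to_bigram_spec : Claim_equal_text_to_bigram := by
  intro input_ _
  show text_to_bigram input_ = text_to_bigram_alt input_
  unfold text_to_bigram text_to_bigram_alt
  rw [PySem.List.foldl_append_singleton_eq_map, PySem.List.foldl_append_singleton_eq_map]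
  simp only [List.nil_append]
  rw [foldB _ [] 0 (by decide), List.nil_append]
  have := sliceA [] (input_.toList.map (fun c => String.ofList [c]))
  simpa using this
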